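-- pv_equiv track=rewrite | github.com/skoricky/algo | hw02_5.py | rows_ascii
-- ===== SOURCE A (Python) =====
-- def rows_ascii(row='', row_cells=0, inx=32, inx_stop=128):
--     if inx == inx_stop:
--         return row
--
--     if row_cells == 10:
--         row_cells = 0
--         row += '\n'
--
--     row += f'{inx: >5}: {chr(inx): ^5} '
--     return rows_ascii(row, row_cells + 1, inx + 1, inx_stop)
-- ===== SOURCE B (Python) =====
-- def rows_ascii(row='', row_cells=0, inx=32, inx_stop=128):
--     while inx != inx_stop:
--         if row_cells == 10:
--             row_cells = 0
--             row += '\n'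
--         row += f'{inx: >5}: {chr(inx): ^5} '
--         row_cells += 1
--         inx += 1
--     return row
-- ===== Notes on version B (the rewrite author's own statement) =====
-- stated objective: idiomatic
-- what changed: Replaces the tail recursion (which hits Python's recursion limit on long ranges) by a plain while-loop that threads the same (row, row_cells, inx) state; Pre_ excludes inx > inx_stop, where A raises RecursionError, and ranges on which chr raises or produces surrogate code points.
import Mathlib
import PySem

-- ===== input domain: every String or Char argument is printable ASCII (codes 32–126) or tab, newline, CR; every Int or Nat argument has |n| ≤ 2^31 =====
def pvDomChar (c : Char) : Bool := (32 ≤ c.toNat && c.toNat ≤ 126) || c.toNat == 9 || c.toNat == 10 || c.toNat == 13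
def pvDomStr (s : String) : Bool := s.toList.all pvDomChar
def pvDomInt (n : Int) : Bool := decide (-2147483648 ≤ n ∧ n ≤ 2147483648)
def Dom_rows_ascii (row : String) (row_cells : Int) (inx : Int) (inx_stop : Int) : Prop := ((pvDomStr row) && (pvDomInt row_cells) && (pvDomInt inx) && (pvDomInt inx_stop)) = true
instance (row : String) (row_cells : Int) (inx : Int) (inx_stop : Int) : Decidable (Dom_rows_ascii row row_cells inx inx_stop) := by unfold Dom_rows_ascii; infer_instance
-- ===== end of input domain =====

-- B replaces A's tail recursion by an iterative while-loop over the same per-step state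
-- (objective: idiomatic, constant stack instead of recursion depth; return value proved equal).

-- ===== PORT A =====
-- f'{i: >5}: {chr(i): ^5} ' — str(i) right-aligned to width 5, ': ', the single char chr(i)
-- centered in width 5 ('  c  '), trailing space.  Exact for 0 ≤ i < 0x110000 off the
-- surrogate block (Pre_ guarantees this), where chr(i) = Char.ofNat i.toNat.
def pvCell (i : Int) : List Char :=
  let s := (PySem.Int.toStr i).toList
  List.replicate (5 - s.length) ' ' ++ s ++ [':', ' ', ' ', ' ', Char.ofNat i.toNat, ' ', ' ', ' ']

def rows_asciiAux (row : List Char) (row_cells : Int) (inx : Int) (inx_stop : Int) : List Char :=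
  if inx = inx_stop then row
  else if h : inx_stop ≤ inx then row   -- totalization guard: Python recurses forever here (RecursionError)
  else
    let rc := if row_cells = 10 then 0 else row_cells
    let row' := if row_cells = 10 then row ++ ['\n'] else row
    rows_asciiAux (row' ++ pvCell inx) (rc + 1) (inx + 1) inx_stop
termination_by (inx_stop - inx).toNat
decreasing_by omega

def rows_ascii (row : String) (row_cells : Int) (inx : Int) (inx_stop : Int) : String :=
  String.mk (rows_asciiAux row.toList row_cells inx inx_stop)

-- ===== PORT B =====
-- One iteration of the while-loop body, acting on the loop state (row, row_cells, inx).
def pvStep (st : List Char × Int × Int) : List Char × Int × Int :=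
  let r₁ := if st.2.1 = 10 then st.1 ++ ['\n'] else st.1
  let c₁ := if st.2.1 = 10 then (0 : Int) else st.2.1
  (r₁ ++ pvCell st.2.2, c₁ + 1, st.2.2 + 1)

-- 'while inx != inx_stop' runs exactly (inx_stop - inx).toNat iterations when inx ≤ inx_stop
-- (Pre_ excludes inx > inx_stop, where the Python loop never terminates).
def rows_ascii_alt (row : String) (row_cells : Int) (inx : Int) (inx_stop : Int) : String :=
  String.mk (pvStep^[(inx_stop - inx).toNat] (row.toList, row_cells, inx)).1

-- ===== PRECONDITION & SPEC =====
-- Pre_ excludes exactly: inx > inx_stop, on which A recurses forever (RecursionError); ranges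
-- reaching codepoints < 0 or ≥ 0x110000, on which chr raises ValueError; and ranges touching
-- the surrogate block [0xD800, 0xE000), where A returns a string containing lone surrogates,
-- which are not Unicode scalar values and cannot be held in a Lean String.
def Pre_rows_ascii (row : String) (row_cells : Int) (inx : Int) (inx_stop : Int) : Prop :=
  inx = inx_stop ∨
    (inx < inx_stop ∧ 0 ≤ inx ∧ inx_stop ≤ 1114112 ∧ ¬(inx < 57344 ∧ 55296 < inx_stop))
instance (row : String) (row_cells : Int) (inx : Int) (inx_stop : Int) : Decidable (Pre_rows_ascii row row_cells inx inx_stop) := by unfold Pre_rows_ascii; infer_instance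

def pvWitness_rows_ascii : String × Int × Int × Int := ("", 0, 32, 42)

def Spec_rows_ascii (row : String) (row_cells : Int) (inx : Int) (inx_stop : Int) (out : String) : Prop := out = rows_ascii_alt row row_cells inx inx_stop
instance (row : String) (row_cells : Int) (inx : Int) (inx_stop : Int) (out : String) : Decidable (Spec_rows_ascii row row_cells inx inx_stop out) := by unfold Spec_rows_ascii; infer_instance

-- ===== CLAIM (what is proved, stated in full; the proofs are below) =====
def Claim_equal_rows_ascii : Prop := ∀ (row : String) (row_cells : Int) (inx : Int) (inx_stop : Int), Dom_rows_ascii row row_cells inx inx_stop → Pre_rows_ascii row row_cells inx inx_stop → Spec_rows_ascii row row_cells inx inx_stop (rows_ascii row row_cells inx inx_stop)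

-- ===== LEMMAS AND PROOFS =====

theorem rows_asciiAux_eq_iterate (n : Nat) : ∀ (row : List Char) (rc inx inx_stop : Int),
    (inx_stop - inx).toNat = n →
    rows_asciiAux row rc inx inx_stop = (pvStep^[n] (row, rc, inx)).1 := by
  induction n with
  | zero =>
    intro row rc inx inx_stop hn
    rw [rows_asciiAux]
    have hle : inx_stop ≤ inx := by omega
    by_cases h : inx = inx_stop <;> simp [h, hle]
  | succ n ih =>
    intro row rc inx inx_stop hn
    rw [rows_asciiAux, if_neg (by omega), dif_neg (by omega)]
    rw [Function.iterate_succ_apply]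
    exact ih _ _ _ _ (by omega)

-- ===== VERDICT (by name: the statement is the Claim_ definition above) =====
theorem rows_ascii_spec : Claim_equal_rows_ascii := by
  intro row rc inx inx_stop _ _
  unfold Spec_rows_ascii rows_ascii rows_ascii_alt
  rw [rows_asciiAux_eq_iterate ((inx_stop - inx).toNat) row.toList rc inx inx_stop rfl]
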